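-- pv_equiv track=rewrite | github.com/mura4k/Tibetan-OCR-analysis | scripts/preprocessing/tokenize_text.py | tokenize_files
-- ===== SOURCE A (Python) =====
-- from typing import List, Dict, Tuple
--
-- def string_tokenizer(text: str) -> List[str]:
--     text = text.replace('  ', ' ')
--     result = []
--     shad = '/'
--     igo = '@'
--     prev = ''
--
--     for char in text:
--         if char == ' ':
--             if prev:
--                 result.append(prev)
--             prev = ''
--         elif char in {shad, igo}:
--             if prev and prev[-1] == char:
--                 prev += char
--             else:
--                 if prev:
--                     result.append(prev)
--                 prev = char
--         else:
--             if prev and prev[-1] in {shad, igo}: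
--                 result.append(prev)
--                 prev = char
--             else:
--                 prev += char
--
--     if prev:
--         result.append(prev)
--
--     return result
--
-- def tokenize_files(ocr_data: Dict, man_data: Dict) -> Tuple[Dict, Dict]:
--     # in case first string is not recognised in OCR file, add empty string to the beginning
--     if len(ocr_data) == len(man_data) - 1:
--         new_ocr_data = {"1": ""}
--         for key in sorted(ocr_data.keys(), key=int):
--             new_ocr_data[str(int(key) + 1)] = ocr_data[key]
--         ocr_data = new_ocr_data
--
--     # tokenize strings in ocr and man files
--     for string_num in ocr_data.keys():
--         ocr_data[string_num] = string_tokenizer(ocr_data[string_num])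
--     for string_num in man_data.keys():
--         man_data[string_num] = string_tokenizer(man_data[string_num])
--
--     return ocr_data, man_data
-- ===== SOURCE B (Python) =====
-- from typing import List, Dict, Tuple
--
-- def string_tokenizer(text: str) -> List[str]:
--     # run-based scanner: spaces delimit; a maximal run of '/' or of '@' is one
--     # token; any maximal run of other characters is one token
--     tokens = []
--     i = 0
--     n = len(text)
--     while i < n:
--         c = text[i]
--         if c == ' ':
--             i += 1
--         else:
--             j = i + 1
--             if c in '/@':
--                 while j < n and text[j] == c:
--                     j += 1
--             else:
--                 while j < n and text[j] not in ' /@':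
--                     j += 1
--             tokens.append(text[i:j])
--             i = j
--     return tokens
--
-- def tokenize_files(ocr_data: Dict, man_data: Dict) -> Tuple[Dict, Dict]:
--     if len(ocr_data) == len(man_data) - 1:
--         ocr_data = dict([("1", "")] +
--                         [(str(int(k) + 1), ocr_data[k])
--                          for k in sorted(ocr_data, key=int)])
--     return ({k: string_tokenizer(v) for k, v in ocr_data.items()},
--             {k: string_tokenizer(v) for k, v in man_data.items()})
-- ===== Notes on version B (the rewrite author's own statement) =====
-- stated objective: alternative
-- what changed: string_tokenizer is rewritten from a character-by-character state machine carrying a 'prev' accumulator into a run-based scanner that jumps over each maximal run of '/', '@' or ordinary characters with an inner index loop and slices the token out (the no-op replace(' ',' ') is dropped); the key-shift builds a fresh dict from a list of pairs instead of inserting into a dict in a loop, and the tokenized dicts are built by comprehensions instead of in-place mutation.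
import Mathlib
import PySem

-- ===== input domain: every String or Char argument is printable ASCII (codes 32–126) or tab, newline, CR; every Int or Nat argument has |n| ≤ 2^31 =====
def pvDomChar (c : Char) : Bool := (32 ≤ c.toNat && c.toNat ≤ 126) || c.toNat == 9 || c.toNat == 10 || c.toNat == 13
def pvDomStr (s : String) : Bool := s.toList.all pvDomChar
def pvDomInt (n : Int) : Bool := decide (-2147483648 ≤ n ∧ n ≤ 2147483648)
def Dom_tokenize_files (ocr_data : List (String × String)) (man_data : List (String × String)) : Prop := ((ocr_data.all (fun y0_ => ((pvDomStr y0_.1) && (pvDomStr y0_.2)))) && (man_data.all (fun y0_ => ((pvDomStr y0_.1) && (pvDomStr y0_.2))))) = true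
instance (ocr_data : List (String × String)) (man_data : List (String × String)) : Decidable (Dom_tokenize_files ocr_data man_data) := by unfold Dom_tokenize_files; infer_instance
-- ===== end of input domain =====

-- B replaces A's character-by-character state machine (prev accumulator) by a run-based
-- scanner and builds the shifted/tokenized dicts as fresh values instead of mutating in
-- place (equivalence is about the RETURN value; Python A mutates its argument dicts).

-- ===== PORT A =====
-- A's loop body over state (result, prev); Python strings ported as List Char.
-- shad = '/', igo = '@'.
def tfStepA (st : List (List Char) × List Char) (char : Char) : List (List Char) × List Char :=
  let result := st.1
  let prev := st.2
  if char = ' ' then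
    (if prev ≠ [] then result ++ [prev] else result, [])
  else if char = '/' ∨ char = '@' then                 -- char in {shad, igo}
    if prev ≠ [] ∧ prev.getLast? = some char then      -- prev[-1] == char (prev nonempty)
      (result, prev ++ [char])
    else
      (if prev ≠ [] then result ++ [prev] else result, [char])
  else
    if prev ≠ [] ∧ (prev.getLast? = some '/' ∨ prev.getLast? = some '@') then
      (result ++ [prev], [char])
    else
      (result, prev ++ [char])

def string_tokenizer (text : String) : List String :=
  let t := PySem.Str.replace text "  " " "
  let st := t.toList.foldl tfStepA ([], [])
  (if st.2 ≠ [] then st.1 ++ [st.2] else st.1).map String.ofList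

-- int(key) ported as (PySem.Int.ofStr? key).getD 0: Python raises ValueError on a
-- non-int key there, which Pre_tokenize_files excludes.
def tfShiftKeyA (k : String) : String := PySem.Int.toStr ((PySem.Int.ofStr? k).getD 0 + 1)

def tokenize_files (ocr_data : List (String × String)) (man_data : List (String × String)) : (List (String × List String)) × (List (String × List String)) :=
  let ocr_data :=
    if (ocr_data.length : Int) = (man_data.length : Int) - 1 then
      ((PySem.List.sorted ((PySem.Dict.mk ocr_data).keys) (fun k => (PySem.Int.ofStr? k).getD 0) false).foldl
          (fun d k => d.insert (tfShiftKeyA k) ((PySem.Dict.mk ocr_data).getD k ""))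
          (PySem.Dict.mk [("1", "")])).items
    else ocr_data
  (ocr_data.map (fun p => (p.1, string_tokenizer p.2)),
   man_data.map (fun p => (p.1, string_tokenizer p.2)))

-- ===== PORT B =====
-- int(k) in Source B, same totalization as port A's (Pre_ excludes the ValueError inputs)
def tfShiftKeyB (k : String) : String := PySem.Int.toStr ((PySem.Int.ofStr? k).getD 0 + 1)

def tfSpecial (c : Char) : Bool := c == '/' || c == '@'
def tfOther (c : Char) : Bool := !(c == ' ' || tfSpecial c)

-- Source B's while loop: skip a space, or take one maximal run as a token and jump past it.
def tfScanB : List Char → List (List Char)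
  | [] => []
  | c :: rest =>
    if c = ' ' then tfScanB rest
    else if tfSpecial c then
      (c :: rest.takeWhile (fun d => d == c)) :: tfScanB (rest.dropWhile (fun d => d == c))
    else
      (c :: rest.takeWhile tfOther) :: tfScanB (rest.dropWhile tfOther)
termination_by l => l.length
decreasing_by
  · simp
  · have := List.length_dropWhile_le (fun d => d == c) rest
    simp; omega
  · have := List.length_dropWhile_le tfOther rest
    simp; omega

def string_tokenizer_alt (text : String) : List String :=
  (tfScanB text.toList).map String.ofList

def tokenize_files_alt (ocr_data : List (String × String)) (man_data : List (String × String)) : (List (String × List String)) × (List (String × List String)) :=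
  let ocr_data :=
    if (ocr_data.length : Int) = (man_data.length : Int) - 1 then
      (PySem.Dict.ofList (("1", "") ::
        (PySem.List.sorted ((PySem.Dict.mk ocr_data).keys) (fun k => (PySem.Int.ofStr? k).getD 0) false).map
          (fun k => (tfShiftKeyB k, (PySem.Dict.mk ocr_data).getD k "")))).items
    else ocr_data
  (ocr_data.map (fun p => (p.1, string_tokenizer_alt p.2)),
   man_data.map (fun p => (p.1, string_tokenizer_alt p.2)))

-- ===== PRECONDITION & SPEC =====
-- The Python arguments are dicts, so Pre_ excludes association lists with duplicate
-- keys (they denote no Python dict); and when the key-shift branch is taken A calls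
-- int(key) on every OCR key, raising ValueError on non-int keys: Pre_ excludes those.
def Pre_tokenize_files (ocr_data : List (String × String)) (man_data : List (String × String)) : Prop :=
  (ocr_data.map Prod.fst).Nodup ∧ (man_data.map Prod.fst).Nodup ∧
  ((ocr_data.length : Int) = (man_data.length : Int) - 1 →
    ∀ k ∈ ocr_data.map Prod.fst, (PySem.Int.ofStr? k).isSome = true)
instance (ocr_data : List (String × String)) (man_data : List (String × String)) : Decidable (Pre_tokenize_files ocr_data man_data) := by unfold Pre_tokenize_files; infer_instance

def pvWitness_tokenize_files : (List (String × String)) × (List (String × String)) :=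
  ([("1", "ab//cd @@e")], [("1", "x /"), ("2", " y@")])

def Spec_tokenize_files (ocr_data : List (String × String)) (man_data : List (String × String)) (out : (List (String × List String)) × (List (String × List String))) : Prop := out = tokenize_files_alt ocr_data man_data
instance (ocr_data : List (String × String)) (man_data : List (String × String)) (out : (List (String × List String)) × (List (String × List String))) : Decidable (Spec_tokenize_files ocr_data man_data out) := by unfold Spec_tokenize_files; infer_instance

-- ===== CLAIM (what is proved, stated in full; the proofs are below) =====
def Claim_equal_tokenize_files : Prop := ∀ (ocr_data : List (String × String)) (man_data : List (String × String)), Dom_tokenize_files ocr_data man_data → Pre_tokenize_files ocr_data man_data → Spec_tokenize_files ocr_data man_data (tokenize_files ocr_data man_data)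

-- ===== LEMMAS AND PROOFS =====

-- final flush of A's loop state, and "run A's loop on l from state st, then flush"
def tfFlush (st : List (List Char) × List Char) : List (List Char) :=
  if st.2 ≠ [] then st.1 ++ [st.2] else st.1

def tfRun (l : List Char) (st : List (List Char) × List Char) : List (List Char) :=
  tfFlush (l.foldl tfStepA st)

-- the single left-to-right pass of replace('  ', ' '), as a clean recursion
def tfCollapse : List Char → List Char
  | [] => []
  | [c] => [c]
  | c :: d :: t => if c = ' ' ∧ d = ' ' then ' ' :: tfCollapse t else c :: tfCollapse (d :: t)

lemma tfReplace_go_eq : ∀ (fuel : Nat) (l acc : List Char), l.length ≤ fuel →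
    PySem.Chars.replace.go [' ', ' '] [' '] fuel l acc = acc.reverse ++ tfCollapse l := by
  intro fuel
  induction fuel with
  | zero =>
    intro l acc h
    have : l = [] := List.eq_nil_of_length_eq_zero (Nat.le_zero.mp h)
    subst this; simp [PySem.Chars.replace.go, tfCollapse]
  | succ n ih =>
    intro l acc h
    match l with
    | [] => simp [PySem.Chars.replace.go, tfCollapse]
    | [c] =>
      have hpre : [' ', ' '].isPrefixOf [c] = false := by simp [List.isPrefixOf]
      rw [show PySem.Chars.replace.go [' ', ' '] [' '] (n+1) [c] acc
            = PySem.Chars.replace.go [' ', ' '] [' '] n [] (c :: acc) from by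
        simp [PySem.Chars.replace.go, hpre]]
      rw [ih [] (c :: acc) (by simp)]
      have h1 : tfCollapse [c] = [c] := by simp [tfCollapse]
      have h0 : tfCollapse [] = ([] : List Char) := rfl
      rw [h1, h0]; simp
    | c :: d :: t =>
      by_cases hcd : c = ' ' ∧ d = ' '
      · obtain ⟨rfl, rfl⟩ := hcd
        rw [show PySem.Chars.replace.go [' ', ' '] [' '] (n+1) (' ' :: ' ' :: t) acc
              = PySem.Chars.replace.go [' ', ' '] [' '] n t ([' '].reverse ++ acc) from by
          simp [PySem.Chars.replace.go, List.isPrefixOf]]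
        rw [ih t _ (by simp at h ⊢; omega)]
        have hcol : tfCollapse (' ' :: ' ' :: t) = ' ' :: tfCollapse t := by simp [tfCollapse]
        rw [hcol]; simp
      · have hpre : [' ', ' '].isPrefixOf (c :: d :: t) = false := by
          simp [List.isPrefixOf]
          intro hc hd; exact hcd ⟨hc.symm, hd.symm⟩
        rw [show PySem.Chars.replace.go [' ', ' '] [' '] (n+1) (c :: d :: t) acc
              = PySem.Chars.replace.go [' ', ' '] [' '] n (d :: t) (c :: acc) from by
          simp [PySem.Chars.replace.go, hpre]]
        rw [ih (d :: t) (c :: acc) (by simp at h ⊢; omega)]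
        have hcol : tfCollapse (c :: d :: t) = c :: tfCollapse (d :: t) := by
          simp [tfCollapse, hcd]
        rw [hcol]; simp

lemma tfReplace_eq (s : List Char) : PySem.Chars.replace s [' ', ' '] [' '] = tfCollapse s := by
  rw [PySem.Chars.replace]
  rw [if_neg (by decide : ¬(([' ', ' '] : List Char).isEmpty = true))]
  simpa using tfReplace_go_eq s.length s [] (le_refl _)

-- A's step on a space from a flushed state does nothing, so A's fold cannot tell
-- "  " from " ": it is invariant under tfCollapse.
lemma tfFoldl_collapse (l : List Char) : ∀ st, (tfCollapse l).foldl tfStepA st = l.foldl tfStepA st := by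
  induction l using tfCollapse.induct with
  | case1 => intro st; rfl
  | case2 c => intro st; rfl
  | case3 c d t hcd ih =>
    obtain ⟨rfl, rfl⟩ := hcd
    intro st
    have hcol : tfCollapse (' ' :: ' ' :: t) = ' ' :: tfCollapse t := by simp [tfCollapse]
    rw [hcol]
    simp only [List.foldl_cons]
    rw [ih]
    have hid : tfStepA (tfStepA st ' ') ' ' = tfStepA st ' ' := by simp [tfStepA]
    rw [hid]
  | case4 c d t hcd ih =>
    intro st
    have hcol : tfCollapse (c :: d :: t) = c :: tfCollapse (d :: t) := by simp [tfCollapse, hcd]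
    rw [hcol]
    simp only [List.foldl_cons]
    exact ih (tfStepA st c)

-- unfolding lemmas for B's scanner
lemma tfScanB_nil : tfScanB [] = [] := by rw [tfScanB.eq_def]

lemma tfScanB_cons (c : Char) (rest : List Char) : tfScanB (c :: rest) =
    (if c = ' ' then tfScanB rest
     else if tfSpecial c then
       (c :: rest.takeWhile (fun d => d == c)) :: tfScanB (rest.dropWhile (fun d => d == c))
     else
       (c :: rest.takeWhile tfOther) :: tfScanB (rest.dropWhile tfOther)) := by
  rw [tfScanB.eq_def]

-- the shapes of A's step used by the equivalence proof
lemma tfStepA_space_nil (r : List (List Char)) : tfStepA (r, []) ' ' = (r, []) := by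
  simp [tfStepA]

lemma tfStepA_space_flush (r : List (List Char)) (p : List Char) (hp : p ≠ []) :
    tfStepA (r, p) ' ' = (r ++ [p], []) := by
  simp [tfStepA, hp]

lemma tfStepA_nonspace_nil (r : List (List Char)) (c : Char) (h1 : ¬ c = ' ') :
    tfStepA (r, []) c = (r, [c]) := by
  by_cases h2 : c = '/' ∨ c = '@' <;> simp [tfStepA, h1, h2]

lemma tfStepA_cont_special (r : List (List Char)) (p : List Char) (c : Char)
    (hsp : c = '/' ∨ c = '@') (hp : p ≠ []) (hm : p.getLast? = some c) :
    tfStepA (r, p) c = (r, p ++ [c]) := by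
  have h1 : ¬ c = ' ' := by rcases hsp with rfl | rfl <;> decide
  simp only [tfStepA, if_neg h1, if_pos hsp, if_pos (⟨hp, hm⟩ : p ≠ [] ∧ p.getLast? = some c)]

lemma tfStepA_new_special (r : List (List Char)) (p : List Char) (c : Char)
    (hsp : c = '/' ∨ c = '@') (hp : p ≠ []) (hne : p.getLast? ≠ some c) :
    tfStepA (r, p) c = (r ++ [p], [c]) := by
  have h1 : ¬ c = ' ' := by rcases hsp with rfl | rfl <;> decide
  simp only [tfStepA, if_neg h1, if_pos hsp,
    if_neg (fun h : p ≠ [] ∧ p.getLast? = some c => hne h.2), if_pos hp]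

lemma tfStepA_flush_other (r : List (List Char)) (p : List Char) (c : Char)
    (h1 : ¬ c = ' ') (hnsp : ¬ (c = '/' ∨ c = '@'))
    (h : p ≠ [] ∧ (p.getLast? = some '/' ∨ p.getLast? = some '@')) :
    tfStepA (r, p) c = (r ++ [p], [c]) := by
  simp only [tfStepA, if_neg h1, if_neg hnsp, if_pos h]

lemma tfStepA_cont_other (r : List (List Char)) (p : List Char) (c : Char)
    (h1 : ¬ c = ' ') (hnsp : ¬ (c = '/' ∨ c = '@'))
    (h : ¬ (p ≠ [] ∧ (p.getLast? = some '/' ∨ p.getLast? = some '@'))) :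
    tfStepA (r, p) c = (r, p ++ [c]) := by
  simp only [tfStepA, if_neg h1, if_neg hnsp, if_neg h]

lemma tfSpecial_true {c : Char} (h : c = '/' ∨ c = '@') : tfSpecial c = true := by
  rcases h with rfl | rfl <;> decide

lemma tfSpecial_false {c : Char} (h : ¬ (c = '/' ∨ c = '@')) : tfSpecial c = false := by
  simp [tfSpecial]
  exact ⟨fun hc => h (Or.inl hc), fun hc => h (Or.inr hc)⟩

-- the core equivalence: A's flushed fold from any reachable state, against B's runs
lemma tfRun_spec : ∀ l : List Char,
    (∀ r, tfRun l (r, []) = r ++ tfScanB l)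
    ∧ (∀ r p c, p.getLast? = some c → (c = '/' ∨ c = '@') →
        tfRun l (r, p) = r ++ (p ++ l.takeWhile (fun d => d == c)) :: tfScanB (l.dropWhile (fun d => d == c)))
    ∧ (∀ r p c, p.getLast? = some c → c ≠ ' ' → ¬(c = '/' ∨ c = '@') →
        tfRun l (r, p) = r ++ (p ++ l.takeWhile tfOther) :: tfScanB (l.dropWhile tfOther)) := by
  intro l
  induction l with
  | nil =>
    refine ⟨fun r => by simp [tfRun, tfFlush, tfScanB_nil], fun r p c hlast _ => ?_,
      fun r p c hlast _ _ => ?_⟩ <;>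
      · have hp : p ≠ [] := by rintro rfl; simp at hlast
        simp [tfRun, tfFlush, tfScanB_nil, hp]
  | cons c' l' ih =>
    obtain ⟨ih1, ih2, ih3⟩ := ih
    have hstep : ∀ st, tfRun (c' :: l') st = tfRun l' (tfStepA st c') := by
      intro st; simp [tfRun]
    refine ⟨fun r => ?_, fun r p c hlast hc => ?_, fun r p c hlast hcs hc => ?_⟩
    · -- part 1: empty prev
      rw [hstep]
      by_cases h1 : c' = ' '
      · subst h1
        rw [tfStepA_space_nil, ih1]
        simp [tfScanB_cons]
      · rw [tfStepA_nonspace_nil r c' h1]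
        by_cases h2 : c' = '/' ∨ c' = '@'
        · rw [ih2 r [c'] c' (by simp) h2]
          simp [tfScanB_cons, h1, tfSpecial_true h2]
        · rw [ih3 r [c'] c' (by simp) h1 h2]
          simp [tfScanB_cons, h1, tfSpecial_false h2]
    · -- part 2: prev ends in a special char c
      have hp : p ≠ [] := by rintro rfl; simp at hlast
      have hcs : c ≠ ' ' := by rcases hc with rfl | rfl <;> decide
      rw [hstep]
      by_cases h1 : c' = ' '
      · subst h1
        rw [tfStepA_space_flush r p hp, ih1]
        have hb : ((' ' : Char) == c) = false := by simp [Ne.symm hcs]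
        simp [hb, tfScanB_cons]
      · by_cases heq : c' = c
        · subst heq
          rw [tfStepA_cont_special r p c' hc hp hlast,
            ih2 r (p ++ [c']) c' List.getLast?_concat hc]
          simp
        · by_cases h2 : c' = '/' ∨ c' = '@'
          · rw [tfStepA_new_special r p c' h2 hp (by
              rw [hlast]; intro hl; exact heq (Option.some.inj hl).symm),
              ih2 (r ++ [p]) [c'] c' (by simp) h2]
            have hb : (c' == c) = false := by simp [heq]
            simp [hb, tfScanB_cons, h1, tfSpecial_true h2]
          · rw [tfStepA_flush_other r p c' h1 h2
              ⟨hp, by rcases hc with rfl | rfl <;> simp [hlast]⟩,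
              ih3 (r ++ [p]) [c'] c' (by simp) h1 h2]
            have hb : (c' == c) = false := by simp [heq]
            simp [hb, tfScanB_cons, h1, tfSpecial_false h2]
    · -- part 3: prev ends in an ordinary char c
      have hp : p ≠ [] := by rintro rfl; simp at hlast
      rw [hstep]
      by_cases h1 : c' = ' '
      · subst h1
        rw [tfStepA_space_flush r p hp, ih1]
        have hto : tfOther ' ' = false := by decide
        simp [hto, tfScanB_cons]
      · by_cases h2 : c' = '/' ∨ c' = '@'
        · rw [tfStepA_new_special r p c' h2 hp (by
              rw [hlast]; intro hl; obtain rfl := Option.some.inj hl; exact hc h2),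
            ih2 (r ++ [p]) [c'] c' (by simp) h2]
          have hto : tfOther c' = false := by simp [tfOther, tfSpecial_true h2]
          simp [hto, tfScanB_cons, h1, tfSpecial_true h2]
        · rw [tfStepA_cont_other r p c' h1 h2 (by
            rintro ⟨-, hl | hl⟩ <;> rw [hlast] at hl <;>
              exact hc (by rw [Option.some.inj hl]; simp)),
            ih3 r (p ++ [c']) c' List.getLast?_concat h1 h2]
          have hto : tfOther c' = true := by
            simp [tfOther, tfSpecial_false h2, h1]
          simp [hto]

lemma tokenizer_eq (text : String) : string_tokenizer text = string_tokenizer_alt text := by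
  show (tfRun (PySem.Str.replace text "  " " ").toList ([], [])).map String.ofList
      = (tfScanB text.toList).map String.ofList
  have h1 : (PySem.Str.replace text "  " " ").toList = tfCollapse text.toList := by
    show (String.ofList (PySem.Chars.replace text.toList "  ".toList " ".toList)).toList = _
    rw [show ("  ".toList) = [' ', ' '] from rfl, show (" ".toList) = [' '] from rfl]
    simp [tfReplace_eq]
  rw [h1, show tfRun (tfCollapse text.toList) ([], []) = tfRun text.toList ([], []) from by
        unfold tfRun; rw [tfFoldl_collapse]]
  rw [(tfRun_spec text.toList).1 []]
  simp

-- ===== VERDICT (by name: the statement is the Claim_ definition above) =====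
theorem tokenize_files_spec : Claim_equal_tokenize_files := by
  intro ocr man _dom _pre
  unfold Spec_tokenize_files tokenize_files tokenize_files_alt
  have htok : string_tokenizer = string_tokenizer_alt := funext tokenizer_eq
  rw [htok]
  by_cases h : (ocr.length : Int) = (man.length : Int) - 1
  · simp only [if_pos h, PySem.Dict.ofList, PySem.Dict.update, List.foldl_cons, List.foldl_map]
    rfl
  · simp only [if_neg h]
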